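-- pv_equiv track=rewrite | github.com/himitery/Algorithm | baekjoon/silver_1/1389/1389.py | findFriend
-- ===== SOURCE A (Python) =====
-- def findFriend(root: int, data: dict[int : list[int]]) -> int:
--     depth: int = 0
--     for destination in list(filter(lambda x: x != root, sorted(data.keys()))):
--         queue: list[tuple[int, int]] = [(0, root)]
--         visited: list[tuple[int, int]] = [(0, root)]
--
--         while len(queue) != 0:
--             target: tuple[int, int] = queue.pop(0)
--
--             if target[1] in data.keys():
--                 for num in data[target[1]]:
--                     if num not in list(map(lambda x: x[1], visited)):
--                         queue.append((target[0] + 1, num))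
--                         visited.append((target[0] + 1, num))
--
--             if destination in list(map(lambda x: x[1], visited)) and target[
--                 0
--             ] not in list(map(lambda x: x[0], queue)):
--                 depth += min(
--                     list(
--                         map(
--                             lambda x: x[0],
--                             list(
--                                 filter(lambda x: x[1] == destination, visited)
--                             ),
--                         )
--                     )
--                 )
--                 break
--     return depth
-- ===== SOURCE B (Python) =====
-- def findFriend(root: int, data: dict) -> int:
--     dist = {root: 0}
--     order = [root]
--     i = 0
--     while i < len(order):
--         u = order[i]
--         i += 1
--         for w in data.get(u, []):
--             if w not in dist:
--                 dist[w] = dist[u] + 1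
--                 order.append(w)
--     return sum(d for node, d in dist.items() if node != root and node in data)
-- ===== Notes on version B (the rewrite author's own statement) =====
-- stated objective: faster
-- what changed: One single BFS from the root with a dict of distances and an index-pointer queue replaces A's per-destination BFS restarts with linear-scan list membership; the answer is the sum of the recorded distances of the keys.
import Mathlib
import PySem

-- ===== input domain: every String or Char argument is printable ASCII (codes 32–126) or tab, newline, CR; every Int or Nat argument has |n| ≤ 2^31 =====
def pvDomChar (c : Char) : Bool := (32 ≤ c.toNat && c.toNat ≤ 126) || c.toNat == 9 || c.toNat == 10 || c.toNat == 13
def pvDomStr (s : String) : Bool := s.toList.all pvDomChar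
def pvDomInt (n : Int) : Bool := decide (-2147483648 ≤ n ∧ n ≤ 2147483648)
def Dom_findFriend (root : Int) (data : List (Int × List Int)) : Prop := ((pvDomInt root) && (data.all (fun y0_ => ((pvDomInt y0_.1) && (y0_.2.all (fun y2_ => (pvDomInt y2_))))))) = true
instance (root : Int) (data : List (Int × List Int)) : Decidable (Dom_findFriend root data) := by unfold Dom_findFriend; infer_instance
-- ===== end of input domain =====

-- B replaces A's per-destination BFS restarts (with linear list-membership scans) by ONE BFS from
-- the root recording distances in a dict, then sums the distances of the reachable keys: faster.


-- fuel for the two `while` loops: each iteration pops one queue element, and every node is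
-- enqueued at most once (guarded by visited/dist), so 1 + |root :: all adjacency entries| as a
-- set bounds the number of iterations of either loop (proved in the lemmas below).
def pvFuel (root : Int) (d : PySem.Dict Int (List Int)) : Nat :=
  1 + (PySem.Set.ofList (root :: d.values.flatten)).length

-- ===== PORT A =====
-- the inner `while queue:` loop of A, for one fixed destination; visited/queue hold (depth, node)
def findFriendLoopA (d : PySem.Dict Int (List Int)) (dest : Int) :
    Nat → List (Int × Int) → List (Int × Int) → Int → Int
  | 0, _, _, dep => dep
  | _ + 1, [], _, dep => dep
  | f + 1, t :: rest, visited, dep =>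
    -- `if target[1] in data.keys(): for num in data[target[1]]: …` = fold over data.get(t.2, [])
    let s := (d.getD t.2 []).foldl
      (fun (s : List (Int × Int) × List (Int × Int)) num =>
        if num ∈ s.2.map (·.2) then s
        else (s.1 ++ [(t.1 + 1, num)], s.2 ++ [(t.1 + 1, num)])) (rest, visited)
    if dest ∈ s.2.map (·.2) ∧ t.1 ∉ s.1.map (·.1) then
      -- Python's min(...) of the filtered depths; nonempty by the guard, so getD 0 is never used
      dep + ((PySem.List.min? ((s.2.filter (fun x => x.2 == dest)).map (·.1)) (fun x => x)).getD 0)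
    else
      findFriendLoopA d dest f s.1 s.2 dep

def findFriend (root : Int) (data : List (Int × List Int)) : Int :=
  let d := PySem.Dict.ofList data
  ((PySem.List.sorted d.keys (fun x => x) false).filter (fun x => !(x == root))).foldl
    (fun depth dest => findFriendLoopA d dest (pvFuel root d) [(0, root)] [(0, root)] depth) 0

-- ===== PORT B =====
-- B's single BFS `while i < len(order):` loop; order is the queue (index pointer i), dist the dict
def findFriendLoopB (d : PySem.Dict Int (List Int)) :
    Nat → List Int → Nat → PySem.Dict Int Int → List Int × PySem.Dict Int Int
  | 0, order, _, dist => (order, dist)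
  | f + 1, order, i, dist =>
    match order[i]? with
    | none => (order, dist)
    | some u =>
      let s := (d.getD u []).foldl
        (fun (s : List Int × PySem.Dict Int Int) w =>
          if s.2.contains w then s
          else (s.1 ++ [w], s.2.insert w (s.2.getD u 0 + 1))) (order, dist)
      findFriendLoopB d f s.1 (i + 1) s.2

def findFriend_alt (root : Int) (data : List (Int × List Int)) : Int :=
  let d := PySem.Dict.ofList data
  let r := findFriendLoopB d (pvFuel root d) [root] 0 (PySem.Dict.empty.insert root 0)
  ((r.2.items.filter (fun p => !(p.1 == root) && d.contains p.1)).map (·.2)).sum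

-- ===== PRECONDITION & SPEC =====
def Spec_findFriend (root : Int) (data : List (Int × List Int)) (out : Int) : Prop := out = findFriend_alt root data
instance (root : Int) (data : List (Int × List Int)) (out : Int) : Decidable (Spec_findFriend root data out) := by unfold Spec_findFriend; infer_instance

-- ===== CLAIM (what is proved, stated in full; the proofs are below) =====
def Claim_equal_findFriend : Prop := ∀ (root : Int) (data : List (Int × List Int)), Dom_findFriend root data → Spec_findFriend root data (findFriend root data)

-- ===== LEMMAS AND PROOFS =====

-- A's queue/visited as images of B's (order, i, dist) state
def qOf (order : List Int) (i : Nat) (dist : PySem.Dict Int Int) : List (Int × Int) :=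
  (order.drop i).map (fun n => (dist.getD n 0, n))
def vOf (dist : PySem.Dict Int Int) : List (Int × Int) :=
  dist.items.map (fun p => (p.2, p.1))

-- the two inner-fold step functions (definitionally the lambdas in the ports)
def aStep (du : Int) : (List (Int × Int) × List (Int × Int)) → Int → (List (Int × Int) × List (Int × Int)) :=
  fun s num => if num ∈ s.2.map (·.2) then s
    else (s.1 ++ [(du + 1, num)], s.2 ++ [(du + 1, num)])
def bStep (u : Int) : (List Int × PySem.Dict Int Int) → Int → (List Int × PySem.Dict Int Int) :=
  fun s w => if s.2.contains w then s
    else (s.1 ++ [w], s.2.insert w (s.2.getD u 0 + 1))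

lemma map_snd_vOf (dist : PySem.Dict Int Int) : (vOf dist).map (·.2) = dist.keys := by
  simp [vOf, PySem.Dict.keys, List.map_map]

lemma keys_length_eq_size (dist : PySem.Dict Int Int) : dist.keys.length = dist.size := by
  simp [PySem.Dict.keys, PySem.Dict.size]

lemma mem_flatten_of_mem_getD (d : PySem.Dict Int (List Int)) (u w : Int)
    (h : w ∈ d.getD u []) : w ∈ d.values.flatten := by
  rw [PySem.Dict.getD_eq_get?_getD] at h
  cases hc : d.get? u with
  | none => rw [hc] at h; simp at h
  | some adj =>
    rw [hc] at h
    have hm : (u, adj) ∈ d.items := PySem.Dict.mem_items_of_get?_eq_some _ hc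
    exact List.mem_flatten.mpr ⟨adj, List.mem_map.mpr ⟨(u, adj), hm, rfl⟩, h⟩

lemma filter_fst_eq_singleton : ∀ (l : List (Int × Int)) (k x : Int),
    (l.map (·.1)).Nodup → (k, x) ∈ l → l.filter (fun p => p.1 == k) = [(k, x)] := by
  intro l k x hnd hm
  induction l with
  | nil => simp at hm
  | cons p t ih =>
    simp only [List.map_cons, List.nodup_cons] at hnd
    rcases List.mem_cons.mp hm with h | h
    · subst h
      simp only [List.filter_cons, beq_self_eq_true, if_pos, List.cons.injEq]
      rw [List.filter_eq_nil_iff.mpr, ]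
      · simp
      · intro q hq hbeq
        exact hnd.1 (List.mem_map.mpr ⟨q, hq, eq_of_beq hbeq⟩)
    · have hk : k ∈ t.map (·.1) := List.mem_map.mpr ⟨(k, x), h, rfl⟩
      have hne : (p.1 == k) = false := by
        rcases hb : p.1 == k with _ | _
        · rfl
        · exact absurd (eq_of_beq hb ▸ hk) hnd.1
      simp only [List.filter_cons, hne]
      exact ih hnd.2 h

-- B's inner fold only inserts fresh keys: old entries survive unchanged
lemma foldB_pres (u k : Int) : ∀ (adj : List Int) (st : List Int × PySem.Dict Int Int),
    st.2.contains k = true →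
    (adj.foldl (bStep u) st).2.contains k = true ∧
      (adj.foldl (bStep u) st).2.getD k 0 = st.2.getD k 0 := by
  intro adj
  induction adj with
  | nil => intro st h; exact ⟨h, rfl⟩
  | cons w t ih =>
    intro st h
    by_cases hw : st.2.contains w = true
    · simpa [bStep, List.foldl_cons, hw] using ih st h
    · have hkw : k ≠ w := fun he => hw (he ▸ h)
      have h' : (st.2.insert w (st.2.getD u 0 + 1)).contains k = true := by
        rw [PySem.Dict.contains_insert]; simp [h]
      have hrec := ih (st.1 ++ [w], st.2.insert w (st.2.getD u 0 + 1)) h'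
      have hstep : List.foldl (bStep u) st (w :: t)
          = List.foldl (bStep u) (st.1 ++ [w], st.2.insert w (st.2.getD u 0 + 1)) t := by
        simp [bStep, List.foldl_cons, hw]
      rw [hstep]
      exact ⟨hrec.1, hrec.2.trans (PySem.Dict.getD_insert_of_ne _ _ _ hkw)⟩

lemma foldB_nodup (u : Int) : ∀ (adj : List Int) (st : List Int × PySem.Dict Int Int),
    st.2.keys.Nodup → (adj.foldl (bStep u) st).2.keys.Nodup := by
  intro adj
  induction adj with
  | nil => intro st h; exact h
  | cons w t ih =>
    intro st h
    by_cases hw : st.2.contains w = true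
    · simpa [bStep, List.foldl_cons, hw] using ih st h
    · have hstep : List.foldl (bStep u) st (w :: t)
          = List.foldl (bStep u) (st.1 ++ [w], st.2.insert w (st.2.getD u 0 + 1)) t := by
        simp [bStep, List.foldl_cons, hw]
      rw [hstep]
      exact ih _ (PySem.Dict.nodup_keys_insert _ _ _ h)

lemma loopB_pres (d : PySem.Dict Int (List Int)) (k : Int) :
    ∀ (f : Nat) (order : List Int) (i : Nat) (dist : PySem.Dict Int Int),
    dist.contains k = true →
    (findFriendLoopB d f order i dist).2.contains k = true ∧
      (findFriendLoopB d f order i dist).2.getD k 0 = dist.getD k 0 := by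
  intro f
  induction f with
  | zero => intro order i dist h; exact ⟨h, rfl⟩
  | succ f ih =>
    intro order i dist h
    rw [findFriendLoopB]
    cases hoi : order[i]? with
    | none => exact ⟨h, rfl⟩
    | some u =>
      have hstep := foldB_pres u k (d.getD u []) (order, dist) h
      have hrec := ih (List.foldl (bStep u) (order, dist) (d.getD u [])).1 (i + 1)
        (List.foldl (bStep u) (order, dist) (d.getD u [])).2 hstep.1
      exact ⟨hrec.1, hrec.2.trans hstep.2⟩

lemma loopB_nodup (d : PySem.Dict Int (List Int)) :
    ∀ (f : Nat) (order : List Int) (i : Nat) (dist : PySem.Dict Int Int),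
    dist.keys.Nodup → (findFriendLoopB d f order i dist).2.keys.Nodup := by
  intro f
  induction f with
  | zero => intro order i dist h; exact h
  | succ f ih =>
    intro order i dist h
    rw [findFriendLoopB]
    cases hoi : order[i]? with
    | none => exact h
    | some u =>
      exact ih (List.foldl (bStep u) (order, dist) (d.getD u [])).1 (i + 1)
        (List.foldl (bStep u) (order, dist) (d.getD u [])).2
        (foldB_nodup u (d.getD u []) (order, dist) h)

-- the simulation of one expansion step: A's fold over the adjacency list is the image of B's
lemma stepSim (u du : Int) (j : Nat) :
    ∀ (adj : List Int) (order : List Int) (dist : PySem.Dict Int Int),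
    dist.keys.Nodup → order = dist.keys → j ≤ order.length →
    dist.contains u = true → du = dist.getD u 0 →
    (adj.foldl (aStep du) (qOf order j dist, vOf dist)
        = (qOf (adj.foldl (bStep u) (order, dist)).1 j (adj.foldl (bStep u) (order, dist)).2,
           vOf (adj.foldl (bStep u) (order, dist)).2))
    ∧ (adj.foldl (bStep u) (order, dist)).1 = (adj.foldl (bStep u) (order, dist)).2.keys
    ∧ (adj.foldl (bStep u) (order, dist)).2.keys.Nodup
    ∧ (∀ k, dist.contains k = true →
        (adj.foldl (bStep u) (order, dist)).2.contains k = true ∧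
        (adj.foldl (bStep u) (order, dist)).2.getD k 0 = dist.getD k 0)
    ∧ (∀ k, (adj.foldl (bStep u) (order, dist)).2.contains k = true →
        dist.contains k = true ∨ k ∈ adj)
    ∧ (adj.foldl (bStep u) (order, dist)).1.length + dist.size
        = order.length + (adj.foldl (bStep u) (order, dist)).2.size
    ∧ dist.size ≤ (adj.foldl (bStep u) (order, dist)).2.size := by
  intro adj
  induction adj with
  | nil =>
    intro order dist hnd hord _ _ _
    simp only [List.foldl_nil]
    exact ⟨trivial, hord, hnd, fun k h => ⟨h, trivial⟩, fun k h => Or.inl h, trivial, le_refl _⟩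
  | cons w t ih =>
    intro order dist hnd hord hj hu hdu
    by_cases hw : dist.contains w = true
    · -- w already known: both folds skip this element
      have hA : List.foldl (aStep du) (qOf order j dist, vOf dist) (w :: t)
          = List.foldl (aStep du) (qOf order j dist, vOf dist) t := by
        rw [List.foldl_cons]; congr 1
        simp only [aStep]
        rw [if_pos]
        exact (map_snd_vOf dist) ▸ (hord ▸ (PySem.Dict.contains_iff_mem_keys dist w).mp hw)
      have hB : List.foldl (bStep u) (order, dist) (w :: t)
          = List.foldl (bStep u) (order, dist) t := by
        simp [bStep, List.foldl_cons, hw]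
      rw [hA, hB]
      obtain ⟨c1, c2, c3, c4, c5, c6, c7⟩ := ih order dist hnd hord hj hu hdu
      exact ⟨c1, c2, c3, c4, fun k h => (c5 k h).imp id (List.mem_cons_of_mem w), c6, c7⟩
    · -- w fresh: both sides append it
      have hwne : ∀ k, dist.contains k = true → k ≠ w := fun k hk he => hw (he ▸ hk)
      have hdist' : (dist.insert w (dist.getD u 0 + 1)).keys = order ++ [w] := by
        rw [PySem.Dict.keys_insert_of_not_contains _ _ (Bool.not_eq_true _ ▸ hw), hord]
      have hB : List.foldl (bStep u) (order, dist) (w :: t)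
          = List.foldl (bStep u) (order ++ [w], dist.insert w (dist.getD u 0 + 1)) t := by
        simp [bStep, List.foldl_cons, hw]
      have hwmem : w ∉ (vOf dist).map (·.2) := by
        rw [map_snd_vOf]
        exact fun hm => hw ((PySem.Dict.contains_iff_mem_keys dist w).mpr hm)
      have hq' : qOf order j dist ++ [(du + 1, w)]
          = qOf (order ++ [w]) j (dist.insert w (dist.getD u 0 + 1)) := by
        unfold qOf
        rw [List.drop_append_of_le_length hj, List.map_append]
        congr 1
        · apply List.map_congr_left
          intro n hn
          have hnk : n ∈ dist.keys := hord ▸ (List.mem_of_mem_drop hn)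
          have : n ≠ w := hwne n ((PySem.Dict.contains_iff_mem_keys dist n).mpr hnk)
          rw [PySem.Dict.getD_insert_of_ne _ _ _ this]
        · rw [List.map_cons, List.map_nil, PySem.Dict.getD_insert_self, hdu]
      have hv' : vOf dist ++ [(du + 1, w)] = vOf (dist.insert w (dist.getD u 0 + 1)) := by
        unfold vOf
        rw [PySem.Dict.items_insert_of_not_contains _ _ (Bool.not_eq_true _ ▸ hw),
          List.map_append, List.map_cons, List.map_nil, hdu]
      have hA : List.foldl (aStep du) (qOf order j dist, vOf dist) (w :: t)
          = List.foldl (aStep du)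
              (qOf (order ++ [w]) j (dist.insert w (dist.getD u 0 + 1)),
               vOf (dist.insert w (dist.getD u 0 + 1))) t := by
        rw [List.foldl_cons]; congr 1
        simp only [aStep]
        rw [if_neg hwmem, hq', hv']
      have hu' : (dist.insert w (dist.getD u 0 + 1)).contains u = true := by
        rw [PySem.Dict.contains_insert]; simp [hu]
      have hdu' : du = (dist.insert w (dist.getD u 0 + 1)).getD u 0 := by
        rw [PySem.Dict.getD_insert_of_ne _ _ _ (hwne u hu)]; exact hdu
      obtain ⟨c1, c2, c3, c4, c5, c6, c7⟩ := ih (order ++ [w]) (dist.insert w (dist.getD u 0 + 1))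
        (PySem.Dict.nodup_keys_insert _ _ _ hnd) hdist'.symm
        (le_trans hj (by simp)) hu' hdu'
      have hsize : (dist.insert w (dist.getD u 0 + 1)).size = dist.size + 1 := by
        rw [PySem.Dict.size_insert, if_neg (by simp [hw])]
      refine ⟨?_, by rw [hB]; exact c2, by rw [hB]; exact c3, ?_, ?_, ?_, ?_⟩
      · rw [hA, hB]; exact c1
      · intro k hk
        have hk' : (dist.insert w (dist.getD u 0 + 1)).contains k = true := by
          rw [PySem.Dict.contains_insert]; simp [hk]
        have := c4 k hk'
        rw [hB]
        exact ⟨this.1, this.2.trans (PySem.Dict.getD_insert_of_ne _ _ _ (hwne k hk))⟩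
      · intro k hk
        rw [hB] at hk
        rcases c5 k hk with h | h
        · rw [PySem.Dict.contains_insert] at h
          rcases (Bool.or_eq_true _ _).mp h with h | h
          · exact Or.inr (List.mem_cons.mpr (Or.inl (eq_of_beq h)))
          · exact Or.inl h
        · exact Or.inr (List.mem_cons_of_mem w h)
      · rw [hB]
        rw [hsize] at c6
        simp only [List.length_append, List.length_cons, List.length_nil] at c6 ⊢
        omega
      · rw [hB]
        rw [hsize] at c7
        omega

lemma loopA_cons (d : PySem.Dict Int (List Int)) (dest : Int) (f : Nat)
    (t : Int × Int) (rest visited : List (Int × Int)) (dep : Int) :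
    findFriendLoopA d dest (f + 1) (t :: rest) visited dep =
      (if dest ∈ ((d.getD t.2 []).foldl (aStep t.1) (rest, visited)).2.map (·.2) ∧
          t.1 ∉ ((d.getD t.2 []).foldl (aStep t.1) (rest, visited)).1.map (·.1) then
        dep + ((PySem.List.min?
          ((((d.getD t.2 []).foldl (aStep t.1) (rest, visited)).2.filter
            (fun x => x.2 == dest)).map (·.1)) (fun x => x)).getD 0)
      else
        findFriendLoopA d dest f ((d.getD t.2 []).foldl (aStep t.1) (rest, visited)).1
          ((d.getD t.2 []).foldl (aStep t.1) (rest, visited)).2 dep) := rfl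

lemma loopB_succ (d : PySem.Dict Int (List Int)) (f : Nat) (order : List Int) (i : Nat)
    (dist : PySem.Dict Int Int) :
    findFriendLoopB d (f + 1) order i dist =
      match order[i]? with
      | none => (order, dist)
      | some u => findFriendLoopB d f ((d.getD u []).foldl (bStep u) (order, dist)).1 (i + 1)
          ((d.getD u []).foldl (bStep u) (order, dist)).2 := rfl

-- the main simulation: A's destination-BFS returns dep + (distance recorded by B's single BFS)
lemma loopSim (d : PySem.Dict Int (List Int)) (S : List Int)
    (hadj : ∀ u w, w ∈ d.getD u [] → w ∈ S) (dest : Int) :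
    ∀ (f : Nat) (order : List Int) (i : Nat) (dist : PySem.Dict Int Int) (dep : Int),
    dist.keys.Nodup → order = dist.keys →
    (∀ k, dist.contains k = true → k ∈ S) →
    (order.length ≤ i → dist.contains dest = false) →
    (order.length - i) + (S.length - dist.size) ≤ f →
    findFriendLoopA d dest f (qOf order i dist) (vOf dist) dep
      = dep + (findFriendLoopB d f order i dist).2.getD dest 0 := by
  intro f
  induction f with
  | zero =>
    intro order i dist dep hnd hord hsub hq0 hfuel
    have hc := hq0 (by omega)
    rw [findFriendLoopA, findFriendLoopB, PySem.Dict.getD_of_not_contains _ _ hc, add_zero]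
  | succ f ih =>
    intro order i dist dep hnd hord hsub hq0 hfuel
    cases hoi : order[i]? with
    | none =>
      have hile : order.length ≤ i := List.getElem?_eq_none_iff.mp hoi
      have hc := hq0 hile
      have hqnil : qOf order i dist = [] := by
        unfold qOf; rw [List.drop_eq_nil_of_le hile, List.map_nil]
      rw [hqnil, findFriendLoopA, loopB_succ, hoi, PySem.Dict.getD_of_not_contains _ _ hc,
        add_zero]
    | some u =>
      have hilt : i < order.length := (List.getElem?_eq_some_iff.mp hoi).1
      have humem : u ∈ order := by
        have h2 := (List.getElem?_eq_some_iff.mp hoi).2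
        exact h2 ▸ List.getElem_mem _
      have hu : dist.contains u = true :=
        (PySem.Dict.contains_iff_mem_keys dist u).mpr (hord ▸ humem)
      have hqcons : qOf order i dist = (dist.getD u 0, u) :: qOf order (i + 1) dist := by
        unfold qOf
        rw [List.drop_eq_getElem_cons hilt, (List.getElem?_eq_some_iff.mp hoi).2, List.map_cons]
      obtain ⟨c1, c2, c3, c4, c5, c6, c7⟩ := stepSim u (dist.getD u 0) (i + 1) (d.getD u [])
        order dist hnd hord (by omega) hu rfl
      rw [hqcons, loopA_cons, loopB_succ, hoi]
      simp only [c1]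
      by_cases hC : dest ∈ (vOf ((d.getD u []).foldl (bStep u) (order, dist)).2).map (·.2) ∧
          (dist.getD u 0) ∉
            (qOf ((d.getD u []).foldl (bStep u) (order, dist)).1 (i + 1)
              ((d.getD u []).foldl (bStep u) (order, dist)).2).map (·.1)
      · rw [if_pos hC]
        have hdest : ((d.getD u []).foldl (bStep u) (order, dist)).2.contains dest = true :=
          (PySem.Dict.contains_iff_mem_keys _ _).mpr (by rw [← map_snd_vOf]; exact hC.1)
        have hpres := loopB_pres d dest f ((d.getD u []).foldl (bStep u) (order, dist)).1 (i + 1)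
          ((d.getD u []).foldl (bStep u) (order, dist)).2 hdest
        rw [hpres.2]
        congr 1
        have hget : ((d.getD u []).foldl (bStep u) (order, dist)).2.get? dest
            = some (((d.getD u []).foldl (bStep u) (order, dist)).2.getD dest 0) := by
          cases hg : ((d.getD u []).foldl (bStep u) (order, dist)).2.get? dest with
          | none => rw [PySem.Dict.contains_eq_isSome_get?, hg] at hdest; simp at hdest
          | some v =>
            have hh := PySem.Dict.getD_eq_get?_getD
              ((d.getD u []).foldl (bStep u) (order, dist)).2 dest 0
            rw [hg] at hh
            rw [hh, Option.getD_some]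
        have hitem := PySem.Dict.mem_items_of_get?_eq_some _ hget
        have hfil := filter_fst_eq_singleton _ _ _ c3 hitem
        have hvfil : (vOf ((d.getD u []).foldl (bStep u) (order, dist)).2).filter
              (fun x => x.2 == dest)
            = [(((d.getD u []).foldl (bStep u) (order, dist)).2.getD dest 0, dest)] := by
          unfold vOf
          rw [List.filter_map]
          rw [show ((fun (x : Int × Int) => x.2 == dest) ∘ fun (p : Int × Int) => (p.2, p.1))
              = (fun (p : Int × Int) => p.1 == dest) from rfl]
          rw [hfil, List.map_cons, List.map_nil]
        rw [hvfil]
        rfl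
      · rw [if_neg hC]
        have hsub' : ∀ k, ((d.getD u []).foldl (bStep u) (order, dist)).2.contains k = true →
            k ∈ S := fun k hk => (c5 k hk).elim (hsub k) (hadj u k)
        have hq0' : ((d.getD u []).foldl (bStep u) (order, dist)).1.length ≤ i + 1 →
            ((d.getD u []).foldl (bStep u) (order, dist)).2.contains dest = false := by
          intro hlen
          by_contra hcon
          apply hC
          refine ⟨?_, ?_⟩
          · rw [map_snd_vOf]
            exact (PySem.Dict.contains_iff_mem_keys _ _).mp (Bool.not_eq_false _ ▸ hcon)
          · have hnil : qOf ((d.getD u []).foldl (bStep u) (order, dist)).1 (i + 1)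
                ((d.getD u []).foldl (bStep u) (order, dist)).2 = [] := by
              unfold qOf; rw [List.drop_eq_nil_of_le hlen, List.map_nil]
            rw [hnil, List.map_nil]
            exact List.not_mem_nil
        have e1 : order.length = dist.size := by rw [hord, keys_length_eq_size]
        have e2 : ((d.getD u []).foldl (bStep u) (order, dist)).1.length
            = ((d.getD u []).foldl (bStep u) (order, dist)).2.size := by
          rw [c2, keys_length_eq_size]
        have hks : ((d.getD u []).foldl (bStep u) (order, dist)).2.keys ⊆ S := fun k hk =>
          hsub' k ((PySem.Dict.contains_iff_mem_keys _ _).mpr hk)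
        have e3 : ((d.getD u []).foldl (bStep u) (order, dist)).2.size ≤ S.length := by
          have := (List.subperm_of_subset c3 hks).length_le
          rwa [keys_length_eq_size] at this
        exact ih _ (i + 1) _ dep c3 c2 hsub' hq0' (by omega)

lemma sum_map_filter_zero (l : List Int) (f : Int → Int) (p : Int → Bool)
    (h : ∀ k ∈ l, p k = false → f k = 0) :
    (l.map f).sum = ((l.filter p).map f).sum := by
  induction l with
  | nil => rfl
  | cons x t ih =>
    have iht := ih (fun k hk => h k (List.mem_cons_of_mem x hk))
    rcases hx : p x with _ | _
    · simp only [List.map_cons, List.sum_cons, List.filter_cons, hx, Bool.false_eq_true,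
        if_false]
      rw [h x (List.mem_cons_self) hx, iht, zero_add]
    · simp only [List.map_cons, List.sum_cons, List.filter_cons, hx, if_true, List.map_cons,
        List.sum_cons]
      rw [iht]

lemma main_eq (root : Int) (data : List (Int × List Int)) :
    findFriend root data = findFriend_alt root data := by
  simp only [findFriend, findFriend_alt]
  set d := PySem.Dict.ofList data with hd
  set S : List Int := PySem.Set.ofList (root :: d.values.flatten) with hS
  set dist0 := PySem.Dict.empty.insert root (0 : Int) with hdist0
  set FD := (findFriendLoopB d (pvFuel root d) [root] 0 dist0).2 with hFD
  have hkeys0 : dist0.keys = [root] := by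
    rw [hdist0, PySem.Dict.keys_insert_of_not_contains _ _ (PySem.Dict.contains_empty root)]
    rfl
  have hnd0 : dist0.keys.Nodup := by rw [hkeys0]; simp
  have hitems0 : dist0.items = [(root, 0)] := by
    rw [hdist0, PySem.Dict.items_insert_of_not_contains _ _ (PySem.Dict.contains_empty root)]
    rfl
  have hq0 : qOf [root] 0 dist0 = [(0, root)] := by
    unfold qOf
    simp [hdist0, PySem.Dict.getD_insert_self]
  have hv0 : vOf dist0 = [(0, root)] := by unfold vOf; rw [hitems0]; rfl
  have hsub0 : ∀ k, dist0.contains k = true → k ∈ S := by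
    intro k hk
    rw [hdist0, PySem.Dict.contains_insert] at hk
    simp only [PySem.Dict.contains_empty, Bool.or_false] at hk
    rw [eq_of_beq hk, hS]
    exact (PySem.Set.mem_ofList _ _).mpr List.mem_cons_self
  have hadjS : ∀ u w, w ∈ d.getD u [] → w ∈ S := fun u w h =>
    (PySem.Set.mem_ofList _ _).mpr (List.mem_cons_of_mem _ (mem_flatten_of_mem_getD d u w h))
  have hsize0 : dist0.size = 1 := by rw [← keys_length_eq_size, hkeys0]; rfl
  have hfuel0 : ([root] : List Int).length - 0 + (S.length - dist0.size) ≤ pvFuel root d := by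
    rw [hsize0, pvFuel, ← hS]
    simp only [List.length_cons, List.length_nil]
    omega
  have hsim : ∀ (dep dest : Int),
      findFriendLoopA d dest (pvFuel root d) [(0, root)] [(0, root)] dep
        = dep + FD.getD dest 0 := by
    intro dep dest
    have h1 : findFriendLoopA d dest (pvFuel root d) [(0, root)] [(0, root)] dep
        = findFriendLoopA d dest (pvFuel root d) (qOf [root] 0 dist0) (vOf dist0) dep := by
      rw [hq0, hv0]
    rw [h1, hFD]
    exact loopSim d S hadjS dest (pvFuel root d) [root] 0 dist0 dep hnd0 hkeys0.symm hsub0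
      (by intro h; simp at h) hfuel0
  rw [PySem.List.foldl_congr_mem _ _ (fun dep dest => dep + FD.getD dest 0) 0
    (fun dep dest _ => hsim dep dest)]
  rw [PySem.List.foldl_add, zero_add]
  -- it remains to reorganise the sum over the keys into B's sum over FD's items
  have hKnd : (PySem.List.sorted d.keys (fun x => x) false).Nodup :=
    (PySem.List.sorted_perm d.keys (fun x => x) false).nodup_iff.mpr
      (PySem.Dict.nodup_keys_ofList data)
  have hdnd : ((PySem.List.sorted d.keys (fun x => x) false).filter
      (fun x => !(x == root))).Nodup := hKnd.filter _
  have hFDnd : FD.keys.Nodup := loopB_nodup d (pvFuel root d) [root] 0 dist0 hnd0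
  have hiFDnd : FD.items.Nodup := by
    have : (FD.items.map (fun p => p.1)).Nodup := hFDnd
    exact this.of_map
  rw [sum_map_filter_zero _ _ (fun k => FD.contains k)
    (fun k _ h => PySem.Dict.getD_of_not_contains _ _ h)]
  have hperm : ((((PySem.List.sorted d.keys (fun x => x) false).filter
        (fun x => !(x == root))).filter (fun k => FD.contains k)).map
          (fun k => (k, FD.getD k 0))).Perm
      (FD.items.filter (fun p => !(p.1 == root) && d.contains p.1)) := by
    apply (List.perm_ext_iff_of_nodup ?_ ?_).mpr
    · intro p
      constructor
      · intro hp
        obtain ⟨k, hk, hpk⟩ := List.mem_map.mp hp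
        obtain ⟨hk1, hk2⟩ := List.mem_filter.mp hk
        obtain ⟨hk3, hk4⟩ := List.mem_filter.mp hk1
        have hkeys : k ∈ d.keys := (PySem.List.sorted_perm d.keys (fun x => x) false).mem_iff.mp hk3
        have hget : FD.get? k = some (FD.getD k 0) := by
          cases hg : FD.get? k with
          | none =>
            rw [PySem.Dict.contains_eq_isSome_get?, hg] at hk2
            simp at hk2
          | some v =>
            have hh := PySem.Dict.getD_eq_get?_getD FD k 0
            rw [hg] at hh
            rw [hh, Option.getD_some]
        have hitem : (k, FD.getD k 0) ∈ FD.items := PySem.Dict.mem_items_of_get?_eq_some _ hget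
        rw [← hpk]
        refine List.mem_filter.mpr ⟨hitem, ?_⟩
        simp only [Bool.and_eq_true]
        refine ⟨hk4, ?_⟩
        rw [PySem.Dict.contains_eq_decide_mem_keys]
        exact decide_eq_true hkeys
      · intro hp
        obtain ⟨hp1, hp2⟩ := List.mem_filter.mp hp
        simp only [Bool.and_eq_true] at hp2
        have hget : FD.get? p.1 = some p.2 := by
          rw [PySem.Dict.get?_eq_some_iff_mem_items _ _ _ hFDnd]
          exact (Prod.mk.eta (p := p)) ▸ hp1
        have hcont : FD.contains p.1 = true := by
          rw [PySem.Dict.contains_eq_isSome_get?, hget]; rfl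
        have hval : FD.getD p.1 0 = p.2 := by
          rw [PySem.Dict.getD_eq_get?_getD, hget, Option.getD_some]
        have hdk : p.1 ∈ d.keys := by
          rw [PySem.Dict.contains_eq_decide_mem_keys] at hp2
          exact of_decide_eq_true hp2.2
        refine List.mem_map.mpr ⟨p.1, ?_, by rw [hval]⟩
        refine List.mem_filter.mpr ⟨List.mem_filter.mpr ⟨?_, hp2.1⟩, hcont⟩
        exact (PySem.List.sorted_perm d.keys (fun x => x) false).mem_iff.mpr hdk
    · exact (hdnd.filter _).map (fun a b h => congrArg Prod.fst h)
    · exact hiFDnd.filter _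
  have hsum := (hperm.map (fun p : Int × Int => p.2)).sum_eq
  rw [List.map_map] at hsum
  exact hsum

-- ===== VERDICT (by name: the statement is the Claim_ definition above) =====
theorem findFriend_spec : Claim_equal_findFriend := by
  intro root data _
  show findFriend root data = findFriend_alt root data
  exact main_eq root data
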